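-- pv_equiv track=rewrite | github.com/landoncrabtree/ephemeral-enhancement | stages/columnar.py | _key_order
-- ===== SOURCE A (Python) =====
-- def _key_order(keyword: str) -> list[int]:
--     pairs = sorted(
--         [(ch, i) for i, ch in enumerate(keyword)], key=lambda x: (x[0], x[1])
--     )
--     order: list[int] = [0] * len(keyword)
--     for rank, (_, original_i) in enumerate(pairs):
--         order[original_i] = rank
--     return order
-- ===== SOURCE B (Python) =====
-- def _key_order(keyword: str) -> list[int]:
--     # Direct rank computation: no sort, no scatter. The rank of position i is
--     # the number of positions whose (char, index) pair is lexicographically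
--     # smaller, which matches the stable sort's tiebreak exactly.
--     order: list[int] = []
--     for i, c in enumerate(keyword):
--         r = 0
--         for j, d in enumerate(keyword):
--             if d < c or (d == c and j < i):
--                 r += 1
--         order.append(r)
--     return order
-- ===== Notes on version B (the rewrite author's own statement) =====
-- stated objective: alternative
-- what changed: Replaces A's sort-then-scatter (build (char,index) pairs, stable-sort them, write each rank back by original index) with a direct per-position count: the rank of position i is the number of positions whose (char,index) pair is lexicographically smaller, computed by a plain double loop with no sort and no index assignment.
import Mathlib
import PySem

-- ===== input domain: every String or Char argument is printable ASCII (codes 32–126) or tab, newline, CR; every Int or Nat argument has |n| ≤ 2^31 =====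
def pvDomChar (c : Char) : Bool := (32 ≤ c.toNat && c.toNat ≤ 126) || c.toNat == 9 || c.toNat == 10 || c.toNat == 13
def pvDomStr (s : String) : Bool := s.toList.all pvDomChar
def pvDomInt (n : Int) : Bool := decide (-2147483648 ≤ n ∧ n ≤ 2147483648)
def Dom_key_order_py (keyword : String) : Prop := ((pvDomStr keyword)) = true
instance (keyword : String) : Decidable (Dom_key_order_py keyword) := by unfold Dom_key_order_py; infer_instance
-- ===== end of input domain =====

-- B replaces A's sort-then-scatter by a direct per-position count of
-- lexicographically smaller (char, index) pairs (objective: alternative).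

-- ===== PORT A =====
-- pairs = sorted([(ch, i) for i, ch in enumerate(keyword)], key=lambda x: (x[0], x[1]))
-- order = [0] * len(keyword); for rank, (_, original_i) in enumerate(pairs): order[original_i] = rank
-- (original_i is a nonnegative enumerate index, so plain List.set is exact for the assignment)
def key_order_py (keyword : String) : List Int :=
  let pairs := PySem.List.sorted2
    ((PySem.List.enumerate keyword.toList 0).map (fun p => (p.2, p.1)))
    (fun x => x.1) (fun x => x.2) false
  let order : List Int := List.replicate keyword.toList.length 0
  (PySem.List.enumerate pairs 0).foldl (fun o rp => o.set rp.2.2.toNat rp.1) order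

-- ===== PORT B =====
-- for i, c in enumerate(keyword): r = 0; for j, d in enumerate(keyword):
--   if d < c or (d == c and j < i): r += 1; order.append(r)
def key_order_py_alt (keyword : String) : List Int :=
  (PySem.List.enumerate keyword.toList 0).foldl (fun order p =>
    order ++ [(PySem.List.enumerate keyword.toList 0).foldl
      (fun r q => if q.2 < p.2 ∨ (q.2 = p.2 ∧ q.1 < p.1) then r + 1 else r) 0]) []

-- ===== PRECONDITION & SPEC =====
def Spec_key_order_py (keyword : String) (out : List Int) : Prop := out = key_order_py_alt keyword
instance (keyword : String) (out : List Int) : Decidable (Spec_key_order_py keyword out) := by unfold Spec_key_order_py; infer_instance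

-- ===== CLAIM (what is proved, stated in full; the proofs are below) =====
def Claim_equal_key_order_py : Prop := ∀ (keyword : String), Dom_key_order_py keyword → Spec_key_order_py keyword (key_order_py keyword)

-- ===== LEMMAS AND PROOFS =====

-- The lexicographic key used by A's sort.
def pvKeyLex (x : Char × Int) : Lex (Char × Int) := toLex (x.1, x.2)

lemma pvKeyLex_lt_iff (a b : Char × Int) :
    pvKeyLex a < pvKeyLex b ↔ a.1 < b.1 ∨ (a.1 = b.1 ∧ a.2 < b.2) := by
  simp [pvKeyLex, Prod.Lex.lt_iff]

lemma pvKeyLex_inj (a b : Char × Int) (h : pvKeyLex a = pvKeyLex b) : a = b := by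
  have h2 := congrArg ofLex h
  simpa [pvKeyLex, Prod.ext_iff] using h2

-- A's sorted2 with keys fst/snd is the stable sort under the lexicographic key.
lemma pv_sorted2_eq_sorted_lex (P : List (Char × Int)) :
    PySem.List.sorted2 P (fun x => x.1) (fun x => x.2) false
      = PySem.List.sorted P pvKeyLex false := by
  have hb : (fun (a b : Char × Int) =>
        (decide (a.1 < b.1) || (!decide (b.1 < a.1) && decide (a.2 < b.2))))
      = fun a b => decide (pvKeyLex a < pvKeyLex b) := by
    funext a b
    rcases lt_trichotomy a.1 b.1 with h | h | h
    · simp [pvKeyLex_lt_iff, h, lt_asymm h]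
    · simp [pvKeyLex_lt_iff, h]
    · simp only [pvKeyLex_lt_iff]
      simp [lt_asymm h, (ne_of_gt h : a.1 ≠ b.1)]
      exact fun hle => absurd hle (not_le.mpr h)
  simp [PySem.List.sorted2, PySem.List.sorted, hb]

-- fold of writes: length is preserved
lemma pv_foldl_set_length {β : Type} (ws : List β) (f : β → Nat) (g : β → Int) (o : List Int) :
    (ws.foldl (fun o w => o.set (f w) (g w)) o).length = o.length := by
  induction ws generalizing o with
  | nil => rfl
  | cons w ws ih => simp [List.foldl_cons, ih]

-- fold of writes: an index never written keeps its value
lemma pv_foldl_set_not_mem {β : Type} (ws : List β) (f : β → Nat) (g : β → Int)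
    (o : List Int) (i : Nat) (h : ∀ w ∈ ws, f w ≠ i) :
    (ws.foldl (fun o w => o.set (f w) (g w)) o)[i]? = o[i]? := by
  induction ws generalizing o with
  | nil => rfl
  | cons w ws ih =>
      rw [List.foldl_cons, ih _ (fun w hw => h w (List.mem_cons_of_mem _ hw))]
      exact List.getElem?_set_ne (h w List.mem_cons_self)

-- fold of writes with pairwise-distinct targets: the unique write to i lands
lemma pv_foldl_set_getElem? {β : Type} (ws : List β) (f : β → Nat) (g : β → Int)
    (o : List Int) (i : Nat) (hi : i < o.length)
    (hnd : (ws.map f).Nodup) (w : β) (hw : w ∈ ws) (hfw : f w = i) :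
    (ws.foldl (fun o w => o.set (f w) (g w)) o)[i]? = some (g w) := by
  induction ws generalizing o with
  | nil => cases hw
  | cons w0 ws ih =>
      rw [List.map_cons, List.nodup_cons] at hnd
      rcases List.mem_cons.1 hw with rfl | hw'
      · have hnot : ∀ w' ∈ ws, f w' ≠ i := by
          intro w' hw' hne
          have : f w' = f w := by rw [hne, hfw]
          exact hnd.1 (this ▸ List.mem_map_of_mem hw')
        rw [List.foldl_cons, pv_foldl_set_not_mem ws f g _ i hnot, hfw,
          List.getElem?_set_self (by simpa using hi)]
      · have hne : f w0 ≠ i := by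
          intro h0
          exact hnd.1 (by rw [h0, ← hfw]; exact List.mem_map_of_mem hw')
        rw [List.foldl_cons]
        exact ih _ (by simpa using hi) hnd.2 hw'

-- in a strictly key-sorted list, the rank of an element counts the smaller ones
lemma pv_rank_eq_countP (S : List (Char × Int))
    (hS : S.Pairwise (fun a b => pvKeyLex a < pvKeyLex b))
    (r : Nat) (hr : r < S.length) :
    S.countP (fun x => decide (pvKeyLex x < pvKeyLex S[r])) = r := by
  have hget := List.pairwise_iff_getElem.1 hS
  set p : Char × Int → Bool := fun x => decide (pvKeyLex x < pvKeyLex S[r]) with hp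
  have h1 : S.countP p = (S.take r).countP p + (S.drop r).countP p := by
    conv_lhs => rw [← List.take_append_drop r S]
    rw [List.countP_append]
  have h2 : (S.take r).countP p = r := by
    have hlen : (S.take r).length = r := by
      rw [List.length_take]; omega
    have hall : ∀ a ∈ S.take r, p a = true := by
      intro a ha
      obtain ⟨j, hj, hja⟩ := List.mem_iff_getElem.1 ha
      have hj' : j < r := by omega
      have hjS : j < S.length := by omega
      have htk : (S.take r)[j] = S[j] := List.getElem_take
      rw [hp]
      simp only [decide_eq_true_eq]
      rw [← hja, htk]
      exact hget j r hjS hr hj'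
    rw [List.countP_eq_length.2 hall, hlen]
  have h3 : (S.drop r).countP p = 0 := by
    rw [List.countP_eq_zero]
    intro a ha
    obtain ⟨j, hj, hja⟩ := List.mem_iff_getElem.1 ha
    have hjS : r + j < S.length := by
      rw [List.length_drop] at hj; omega
    have hdg : (S.drop r)[j] = S[r + j] := List.getElem_drop
    rw [hp]
    simp only [decide_eq_true_eq]
    rw [← hja, hdg]
    rcases Nat.eq_zero_or_pos j with h0 | h0
    · subst h0; simp
    · have hlt := hget r (r + j) hr hjS (by omega)
      exact fun h => absurd h (lt_asymm hlt)
  omega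

-- B unfolded into a map of counts
lemma pv_alt_eq_map (keyword : String) :
    key_order_py_alt keyword = (PySem.List.enumerate keyword.toList 0).map
      (fun p => ((PySem.List.enumerate keyword.toList 0).countP
        (fun q => decide (q.2 < p.2 ∨ (q.2 = p.2 ∧ q.1 < p.1))) : Int)) := by
  unfold key_order_py_alt
  simp only [PySem.List.foldl_ite_add_one, zero_add]
  rw [PySem.List.foldl_append_singleton_eq_map]
  simp

-- the core: A's scatter of sorted ranks equals B's map of counts
lemma pv_main (cs : List Char) :
    (PySem.List.enumerate (PySem.List.sorted
        ((PySem.List.enumerate cs 0).map (fun p => (p.2, p.1))) pvKeyLex false) 0).foldl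
        (fun o rp => o.set rp.2.2.toNat rp.1) (List.replicate cs.length 0)
      = (PySem.List.enumerate cs 0).map
          (fun p => (((PySem.List.enumerate cs 0).countP
            (fun q => decide (q.2 < p.2 ∨ (q.2 = p.2 ∧ q.1 < p.1)))) : Int)) := by
  set E := PySem.List.enumerate cs 0 with hE
  set P := E.map (fun p => (p.2, p.1)) with hP
  set S := PySem.List.sorted P pvKeyLex false with hS
  have hperm : S.Perm P := PySem.List.sorted_perm P pvKeyLex false
  have hEn : E.length = cs.length := PySem.List.length_enumerate cs 0
  have hPn : P.length = cs.length := by rw [hP, List.length_map, hEn]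
  have hSn : S.length = cs.length := by rw [hperm.length_eq, hPn]
  have hmapf : (PySem.List.enumerate S 0).map (fun rp => rp.2.2.toNat)
      = S.map (fun x => x.2.toNat) := by
    rw [show (fun rp : Int × Char × Int => rp.2.2.toNat)
        = (fun x : Char × Int => x.2.toNat) ∘ (fun rp : Int × Char × Int => rp.2) from rfl,
      ← List.map_map, PySem.List.map_snd_enumerate]
  have hPmap : P.map (fun x => x.2.toNat) = E.map (fun p => p.1.toNat) := by
    rw [hP, List.map_map]; rfl
  have hrange : E.map (fun p => p.1.toNat) = List.range cs.length := by
    apply List.ext_getElem (by simp [hEn])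
    intro k h1 h2
    simp only [List.getElem_map, hE, PySem.List.getElem_enumerate, List.getElem_range]
    simp
  have hnd : ((PySem.List.enumerate S 0).map (fun rp => rp.2.2.toNat)).Nodup := by
    rw [hmapf]
    have hp2 : (S.map (fun x => x.2.toNat)).Perm (P.map (fun x => x.2.toNat)) := hperm.map _
    rw [hPmap, hrange] at hp2
    exact hp2.nodup_iff.2 (List.nodup_range)
  have hnodupE : E.Nodup := by
    have hpw := PySem.List.pairwise_lt_enumerate cs 0
    exact hpw.imp (fun h he => by rw [he] at h; exact lt_irrefl _ h)
  have hnodupP : P.Nodup := by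
    refine List.Nodup.map ?_ hnodupE
    intro a b h
    have h1 := congrArg Prod.fst h
    have h2 := congrArg Prod.snd h
    simp only at h1 h2
    exact Prod.ext_iff.2 ⟨h2, h1⟩
  have hnodupS : S.Nodup := (hperm.nodup_iff).2 hnodupP
  have hpairS : S.Pairwise (fun a b => pvKeyLex a < pvKeyLex b) := by
    have hle : S.Pairwise (fun a b => pvKeyLex a ≤ pvKeyLex b) :=
      PySem.List.sorted_pairwise P pvKeyLex
    exact (hle.and hnodupS).imp
      (fun h => lt_of_le_of_ne h.1 (fun he => h.2 (pvKeyLex_inj _ _ he)))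
  apply List.ext_getElem?
  intro i
  by_cases hi : i < cs.length
  · have hmemE : ((0 + (i : Int), cs[i]) : Int × Char) ∈ E :=
      (PySem.List.mem_enumerate_iff cs 0 _).2 ⟨i, hi, rfl⟩
    have hmemP : ((cs[i], 0 + (i : Int)) : Char × Int) ∈ P :=
      List.mem_map_of_mem hmemE
    have hmemS : ((cs[i], 0 + (i : Int)) : Char × Int) ∈ S := hperm.mem_iff.2 hmemP
    obtain ⟨r, hr, hSr⟩ := List.mem_iff_getElem.1 hmemS
    have hmemES : ((0 + (r : Int), S[r]) : Int × Char × Int) ∈ PySem.List.enumerate S 0 :=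
      (PySem.List.mem_enumerate_iff S 0 _).2 ⟨r, hr, rfl⟩
    have hfw : S[r].2.toNat = i := by rw [hSr]; simp
    have hlhs := pv_foldl_set_getElem? (PySem.List.enumerate S 0)
      (fun rp => rp.2.2.toNat) (fun rp => rp.1) (List.replicate cs.length 0) i
      (by simpa using hi) hnd _ hmemES hfw
    have hcount : (r : Int)
        = ((E.countP (fun q => decide (q.2 < cs[i] ∨ (q.2 = cs[i] ∧ q.1 < 0 + (i : Int))))) : Int) := by
      have h1 := pv_rank_eq_countP S hpairS r hr
      have h2 : S.countP (fun x => decide (pvKeyLex x < pvKeyLex S[r]))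
          = P.countP (fun x => decide (pvKeyLex x < pvKeyLex S[r])) := hperm.countP_eq _
      have h3 : P.countP (fun x => decide (pvKeyLex x < pvKeyLex S[r]))
          = E.countP (fun q => decide (pvKeyLex (q.2, q.1) < pvKeyLex S[r])) := by
        rw [hP, List.countP_map]; rfl
      have h4 : E.countP (fun q => decide (pvKeyLex (q.2, q.1) < pvKeyLex S[r]))
          = E.countP (fun q => decide (q.2 < cs[i] ∨ (q.2 = cs[i] ∧ q.1 < 0 + (i : Int)))) := by
        apply List.countP_congr
        intro q _
        rw [hSr]
        simp [pvKeyLex_lt_iff]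
      omega
    have hrhs : (E.map (fun p => ((E.countP
          (fun q => decide (q.2 < p.2 ∨ (q.2 = p.2 ∧ q.1 < p.1))) : Nat) : Int)))[i]?
        = some (((E.countP (fun q => decide (q.2 < cs[i] ∨ (q.2 = cs[i] ∧ q.1 < 0 + (i : Int)))) : Nat) : Int)) := by
      rw [List.getElem?_map, hE, PySem.List.getElem?_enumerate, List.getElem?_eq_getElem hi]
      rfl
    simp only [] at hlhs
    rw [hlhs, hrhs]
    refine congrArg some ?_
    conv_lhs => rw [zero_add]
    exact hcount
  · rw [List.getElem?_eq_none (by rw [pv_foldl_set_length, List.length_replicate]; omega),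
      List.getElem?_eq_none (by rw [List.length_map, hEn]; omega)]

-- ===== VERDICT (by name: the statement is the Claim_ definition above) =====
theorem key_order_py_spec : Claim_equal_key_order_py := by
  intro keyword _
  unfold Spec_key_order_py
  rw [pv_alt_eq_map]
  show (PySem.List.enumerate (PySem.List.sorted2
      ((PySem.List.enumerate keyword.toList 0).map (fun p => (p.2, p.1)))
      (fun x => x.1) (fun x => x.2) false) 0).foldl
      (fun o rp => o.set rp.2.2.toNat rp.1) (List.replicate keyword.toList.length 0) = _
  rw [pv_sorted2_eq_sorted_lex]
  exact pv_main keyword.toList
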